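-- pv_equiv track=rewrite | github.com/TitanicThompson1/FPRO | Play/Dictionaries/sort_by_value.py | hash_color
-- ===== SOURCE A (Python) =====
-- def hash_color(tpl):
--
--     soma=0
--     i,hexa=tpl
--     hexa=hexa[1:]
--     comp=len(hexa)-1
--     for i,charac in enumerate(hexa):
--         if charac.isdigit():
--             soma+=int(charac)*(16**(comp-i))
--         elif charac=="A":
--             soma+=10*(16**(comp-i))
--         elif charac=="B":
--             soma+=11*(16**(comp-i))
--         elif charac=="C":
--             soma+=12*(16**(comp-i))
--         elif charac=="D":
--             soma+=13*(16**(comp-i))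
--         elif charac=="E":
--             soma+=14*(16**(comp-i))
--         elif charac=="F":
--             soma+=15*(16**(comp-i))
--     return soma
-- ===== SOURCE B (Python) =====
-- LETTERS = {'A': 10, 'B': 11, 'C': 12, 'D': 13, 'E': 14, 'F': 15}
--
-- def hash_color(tpl):
--     _, hexa = tpl
--     soma = 0
--     for c in hexa[1:]:
--         soma = soma * 16 + (int(c) if c.isdigit() else LETTERS.get(c, 0))
--     return soma
-- ===== Notes on version B (the rewrite author's own statement) =====
-- stated objective: simpler
-- what changed: Horner's method with a single running accumulator (soma = soma*16 + value) replaces A's per-position 16**(comp-i) power terms and the comp/enumerate index bookkeeping.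
import Mathlib
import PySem

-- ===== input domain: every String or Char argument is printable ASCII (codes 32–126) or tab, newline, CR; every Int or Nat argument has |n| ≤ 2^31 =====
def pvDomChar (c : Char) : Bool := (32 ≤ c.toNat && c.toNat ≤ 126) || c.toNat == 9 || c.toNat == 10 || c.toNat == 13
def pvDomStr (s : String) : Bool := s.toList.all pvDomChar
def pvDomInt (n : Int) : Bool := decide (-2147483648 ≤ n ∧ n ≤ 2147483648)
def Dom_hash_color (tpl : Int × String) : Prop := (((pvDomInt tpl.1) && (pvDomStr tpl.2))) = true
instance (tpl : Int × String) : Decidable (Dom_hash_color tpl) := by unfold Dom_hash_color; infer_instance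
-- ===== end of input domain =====

-- B replaces A's 16**(comp-i) power terms and index bookkeeping with a single
-- Horner accumulator (objective: simpler); return values are identical.

-- ===== PORT A =====
-- int(charac) on a char satisfying isdigit (exactly '0'..'9') is its code minus 48: exact.
def hash_color (tpl : Int × String) : Int :=
  let hexa := PySem.Str.slice tpl.2 (some 1) none     -- hexa = hexa[1:]
  let comp : Int := (PySem.Str.len hexa : Int) - 1
  (PySem.List.enumerate hexa.toList 0).foldl (fun soma p =>
    let i := p.1
    let charac := p.2
    if PySem.Chars.isdigit charac then
      soma + ((charac.toNat : Int) - 48) * 16 ^ (comp - i).toNat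
    else if charac = 'A' then soma + 10 * 16 ^ (comp - i).toNat
    else if charac = 'B' then soma + 11 * 16 ^ (comp - i).toNat
    else if charac = 'C' then soma + 12 * 16 ^ (comp - i).toNat
    else if charac = 'D' then soma + 13 * 16 ^ (comp - i).toNat
    else if charac = 'E' then soma + 14 * 16 ^ (comp - i).toNat
    else if charac = 'F' then soma + 15 * 16 ^ (comp - i).toNat
    else soma) 0

-- ===== PORT B =====
def pvLetters : PySem.Dict Char Int :=
  PySem.Dict.ofList [('A', 10), ('B', 11), ('C', 12), ('D', 13), ('E', 14), ('F', 15)]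

def hash_color_alt (tpl : Int × String) : Int :=
  (PySem.Str.slice tpl.2 (some 1) none).toList.foldl
    (fun soma c =>
      soma * 16 + (if PySem.Chars.isdigit c then (c.toNat : Int) - 48
                   else PySem.Dict.getD pvLetters c 0)) 0

-- ===== PRECONDITION & SPEC =====
def Spec_hash_color (tpl : Int × String) (out : Int) : Prop := out = hash_color_alt tpl
instance (tpl : Int × String) (out : Int) : Decidable (Spec_hash_color tpl out) := by unfold Spec_hash_color; infer_instance

-- ===== CLAIM (what is proved, stated in full; the proofs are below) =====
def Claim_equal_hash_color : Prop := ∀ (tpl : Int × String), Dom_hash_color tpl → Spec_hash_color tpl (hash_color tpl)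

-- ===== LEMMAS AND PROOFS =====

-- the per-character value both programs attach to a char
def pvVal (c : Char) : Int :=
  if PySem.Chars.isdigit c then (c.toNat : Int) - 48
  else PySem.Dict.getD pvLetters c 0

def pvHorner (l : List Char) (a : Int) : Int :=
  l.foldl (fun soma c => soma * 16 + pvVal c) a

theorem pvHorner_shift (l : List Char) (a : Int) :
    pvHorner l a = a * 16 ^ l.length + pvHorner l 0 := by
  induction l generalizing a with
  | nil => simp [pvHorner]
  | cons c t ih =>
    show pvHorner t (a * 16 + pvVal c) = _
    have h2 : pvHorner (c :: t) 0 = pvHorner t (0 * 16 + pvVal c) := rfl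
    rw [ih (a * 16 + pvVal c), h2, ih (0 * 16 + pvVal c)]
    simp only [List.length_cons, pow_succ]
    ring

-- A's step equals adding pvVal c times the power
theorem pvStep_eq (comp i soma : Int) (c : Char) :
    (if PySem.Chars.isdigit c then
      soma + ((c.toNat : Int) - 48) * 16 ^ (comp - i).toNat
    else if c = 'A' then soma + 10 * 16 ^ (comp - i).toNat
    else if c = 'B' then soma + 11 * 16 ^ (comp - i).toNat
    else if c = 'C' then soma + 12 * 16 ^ (comp - i).toNat
    else if c = 'D' then soma + 13 * 16 ^ (comp - i).toNat
    else if c = 'E' then soma + 14 * 16 ^ (comp - i).toNat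
    else if c = 'F' then soma + 15 * 16 ^ (comp - i).toNat
    else soma) = soma + pvVal c * 16 ^ (comp - i).toNat := by
  unfold pvVal
  split_ifs with h1 h2 h3 h4 h5 h6 h7
  · rfl
  · subst h2; rw [show pvLetters.getD 'A' (0:Int) = 10 from by decide]
  · subst h3; rw [show pvLetters.getD 'B' (0:Int) = 11 from by decide]
  · subst h4; rw [show pvLetters.getD 'C' (0:Int) = 12 from by decide]
  · subst h5; rw [show pvLetters.getD 'D' (0:Int) = 13 from by decide]
  · subst h6; rw [show pvLetters.getD 'E' (0:Int) = 14 from by decide]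
  · subst h7; rw [show pvLetters.getD 'F' (0:Int) = 15 from by decide]
  · simp [pvLetters, PySem.Dict.ofList, PySem.Dict.update, PySem.Dict.getD_insert,
      PySem.Dict.getD_empty, h2, h3, h4, h5, h6, h7]

theorem pvA_fold (l : List Char) (k : Nat) (comp a : Int)
    (h : comp = (k : Int) + l.length - 1) :
    (PySem.List.enumerate l (k : Int)).foldl
      (fun soma p => soma + pvVal p.2 * 16 ^ (comp - p.1).toNat) a
    = a + pvHorner l 0 := by
  induction l generalizing k a with
  | nil => simp [PySem.List.enumerate_nil, pvHorner]
  | cons c t ih =>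
    rw [PySem.List.enumerate_cons]
    have hk : ((k : Int) + 1) = ((k + 1 : Nat) : Int) := by push_cast; ring
    have hcomp : comp - (k : Int) = (t.length : Int) := by
      simp [List.length_cons] at h; omega
    have hcomp' : comp = ((k + 1 : Nat) : Int) + t.length - 1 := by
      push_cast; simp [List.length_cons] at h; omega
    simp only [List.foldl_cons, hk]
    rw [ih (k + 1) _ hcomp']
    have : pvHorner (c :: t) 0 = pvVal c * 16 ^ t.length + pvHorner t 0 := by
      show pvHorner t (0 * 16 + pvVal c) = _
      rw [pvHorner_shift t (0 * 16 + pvVal c)]; ring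
    rw [this, hcomp]
    simp [Int.toNat_natCast]
    ring

-- ===== VERDICT (by name: the statement is the Claim_ definition above) =====
theorem hash_color_spec : Claim_equal_hash_color := by
  intro tpl _
  show hash_color tpl = hash_color_alt tpl
  unfold hash_color hash_color_alt
  simp only []
  set l := (PySem.Str.slice tpl.2 (some 1) none).toList with hl
  set comp : Int := (PySem.Str.len (PySem.Str.slice tpl.2 (some 1) none) : Int) - 1 with hcomp
  rw [PySem.List.foldl_congr_mem (PySem.List.enumerate l 0) _
      (fun soma p => soma + pvVal p.2 * 16 ^ (comp - p.1).toNat) 0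
      (fun soma p _ => pvStep_eq comp p.1 soma p.2)]
  have h0 := pvA_fold l 0 comp 0 (by simp [hcomp, PySem.Str.len, hl])
  push_cast at h0 ⊢
  rw [h0]
  simp [pvHorner, pvVal]
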